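-- pv_equiv track=rewrite | github.com/JeremyHub/Captain-Sonar | actors/expert_actor.py | _in_torpedo_range
-- ===== SOURCE A (Python) =====
-- def _in_torpedo_range(loc1, loc2):
--     should_continue = False
--     for i in range(-1,2):
--         for j in range(-1,2):
--             if loc1[0]+i == loc2[0] and loc1[1]+j == loc2[1]: should_continue = True
--             if should_continue: continue
--         if should_continue: continue
--     return should_continue
-- ===== SOURCE B (Python) =====
-- def _in_torpedo_range(loc1, loc2):
--     return (loc2[0] in (loc1[0]-1, loc1[0], loc1[0]+1)) and (loc2[1] in (loc1[1]-1, loc1[1], loc1[1]+1))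
-- ===== Notes on version B (the rewrite author's own statement) =====
-- stated objective: simpler
-- what changed: Replaces the nested 3x3 offset loops with a single boolean expression: two independent per-axis membership tests over the three candidate coordinates.
import Mathlib
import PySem

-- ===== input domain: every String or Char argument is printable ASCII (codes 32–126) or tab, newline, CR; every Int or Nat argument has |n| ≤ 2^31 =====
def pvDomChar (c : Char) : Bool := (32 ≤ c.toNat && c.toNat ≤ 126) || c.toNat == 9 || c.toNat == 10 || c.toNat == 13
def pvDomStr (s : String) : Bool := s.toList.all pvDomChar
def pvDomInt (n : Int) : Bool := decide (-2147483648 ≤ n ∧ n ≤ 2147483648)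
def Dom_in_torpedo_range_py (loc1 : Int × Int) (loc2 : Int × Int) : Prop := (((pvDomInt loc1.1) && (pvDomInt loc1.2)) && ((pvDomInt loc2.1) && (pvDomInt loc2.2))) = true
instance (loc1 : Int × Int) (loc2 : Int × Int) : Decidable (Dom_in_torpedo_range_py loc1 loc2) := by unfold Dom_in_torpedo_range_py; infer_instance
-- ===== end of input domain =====

-- B replaces A's nested 3x3 offset loops by one boolean expression of two per-axis membership tests (simpler; same results).


-- ===== PORT A =====
-- nested 3x3 offset loops carrying the `should_continue` flag, as in Python A
def in_torpedo_range_py (loc1 : Int × Int) (loc2 : Int × Int) : Bool :=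
  (PySem.List.pyRange (-1) 2 1).foldl (fun sc i =>
    (PySem.List.pyRange (-1) 2 1).foldl (fun sc j =>
      if loc1.1 + i == loc2.1 && loc1.2 + j == loc2.2 then true else sc) sc) false

-- ===== PORT B =====
-- B: two independent per-axis membership tests (simpler, no loops)
def in_torpedo_range_py_alt (loc1 : Int × Int) (loc2 : Int × Int) : Bool :=
  [loc1.1 - 1, loc1.1, loc1.1 + 1].contains loc2.1 &&
  [loc1.2 - 1, loc1.2, loc1.2 + 1].contains loc2.2

-- ===== PRECONDITION & SPEC =====
def Spec_in_torpedo_range_py (loc1 : Int × Int) (loc2 : Int × Int) (out : Bool) : Prop := out = in_torpedo_range_py_alt loc1 loc2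
instance (loc1 : Int × Int) (loc2 : Int × Int) (out : Bool) : Decidable (Spec_in_torpedo_range_py loc1 loc2 out) := by unfold Spec_in_torpedo_range_py; infer_instance

-- ===== CLAIM (what is proved, stated in full; the proofs are below) =====
def Claim_equal_in_torpedo_range_py : Prop := ∀ (loc1 : Int × Int) (loc2 : Int × Int), Dom_in_torpedo_range_py loc1 loc2 → Spec_in_torpedo_range_py loc1 loc2 (in_torpedo_range_py loc1 loc2)

-- ===== LEMMAS AND PROOFS =====

-- ===== VERDICT (by name: the statement is the Claim_ definition above) =====
theorem in_torpedo_range_py_spec : Claim_equal_in_torpedo_range_py := by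
  intro ⟨a, b⟩ ⟨c, d⟩ _
  show _ = _
  have hr : PySem.List.pyRange (-1) 2 1 = [-1, 0, 1] := by decide
  simp only [in_torpedo_range_py, in_torpedo_range_py_alt, hr, List.foldl,
    List.contains_cons, List.contains_nil, Bool.or_false, Bool.and_eq_true, beq_iff_eq]
  split_ifs <;> simp_all <;> omega
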